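-- pv_equiv track=rewrite | github.com/muhacheff/NaiveBayesianClassifier-of-spam-mails | nbc_of_spam.py | sort_mail
-- ===== SOURCE A (Python) =====
-- def sort_mail(mail, category, table):   ###---Sorting words by category and updates the counters.
--     for i in mail:
--         if category == 'ham':
--             if i in table:
--                 table[i][1] += 1
--             else:
--                 table[i] = [1, 1, 0, 0]
--         elif category == 'spam':
--             if i in table:
--                 table[i][0] += 1
--             else:
--                 table[i] = [1, 1, 0, 0]
--     return table
-- ===== SOURCE B (Python) =====
-- def sort_mail(mail, category, table):
--     # Tally word frequencies once, then update/insert each distinct word a single time.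
--     if category == 'ham':
--         idx = 1
--     elif category == 'spam':
--         idx = 0
--     else:
--         return table
--     counts = {}
--     for w in mail:
--         counts[w] = counts.get(w, 0) + 1
--     for w, c in counts.items():
--         if w in table:
--             table[w][idx] += c
--         else:
--             row = [1, 1, 0, 0]
--             row[idx] = c
--             table[w] = row
--     return table
-- ===== Notes on version B (the rewrite author's own statement) =====
-- stated objective: alternative
-- what changed: B decides the category index up front (returning early for other categories), tallies word frequencies into a dict in one pass, and then touches each distinct word exactly once (add its whole count, or insert a fresh [1,1,0,0] row with the category slot set to the count), instead of A's per-token branch-and-increment loop.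
import Mathlib
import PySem

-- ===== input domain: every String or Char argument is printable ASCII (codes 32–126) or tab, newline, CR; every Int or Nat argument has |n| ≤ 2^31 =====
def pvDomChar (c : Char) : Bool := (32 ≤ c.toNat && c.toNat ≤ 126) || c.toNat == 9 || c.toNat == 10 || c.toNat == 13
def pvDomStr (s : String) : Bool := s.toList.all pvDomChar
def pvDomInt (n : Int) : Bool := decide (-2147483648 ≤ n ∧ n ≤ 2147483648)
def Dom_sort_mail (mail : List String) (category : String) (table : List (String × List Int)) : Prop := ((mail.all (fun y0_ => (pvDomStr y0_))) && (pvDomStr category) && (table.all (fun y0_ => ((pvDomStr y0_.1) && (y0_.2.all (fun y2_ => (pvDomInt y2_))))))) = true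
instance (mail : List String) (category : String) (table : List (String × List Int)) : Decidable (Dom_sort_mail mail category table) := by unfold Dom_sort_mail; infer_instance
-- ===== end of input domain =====

-- B decides the category index up front, tallies word counts once, and updates each distinct
-- word a single time (alternative decomposition, same cost class); both Pythons mutate `table`
-- in place identically, and the equivalence proved here is about the returned table.


-- ===== PORT A =====
def sort_mail (mail : List String) (category : String) (table : List (String × List Int)) : List (String × List Int) :=
  (mail.foldl (fun d i =>
      if category == "ham" then
        if d.contains i then d.insert i ((d.getD i []).set 1 ((d.getD i []).getD 1 0 + 1))
        else d.insert i [1, 1, 0, 0]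
      else if category == "spam" then
        if d.contains i then d.insert i ((d.getD i []).set 0 ((d.getD i []).getD 0 0 + 1))
        else d.insert i [1, 1, 0, 0]
      else d)
    (PySem.Dict.mk table)).items

-- ===== PORT B =====
-- B's core for a decided category index: tally `mail` into a counts dict in one pass,
-- then apply each distinct (word, count) pair once to the table
def sortTally (idx : Nat) (mail : List String) (table : List (String × List Int)) : List (String × List Int) :=
  let counts := mail.foldl (fun d w => d.insert w (d.getD w 0 + 1)) PySem.Dict.empty
  (counts.items.foldl (fun t p =>
      if t.contains p.1 then t.insert p.1 ((t.getD p.1 []).set idx ((t.getD p.1 []).getD idx 0 + p.2))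
      else t.insert p.1 ([1, 1, 0, 0].set idx p.2))
    (PySem.Dict.mk table)).items

def sort_mail_alt (mail : List String) (category : String) (table : List (String × List Int)) : List (String × List Int) :=
  if category == "ham" then sortTally 1 mail table
  else if category == "spam" then sortTally 0 mail table
  else table

-- ===== PRECONDITION & SPEC =====
-- Pre_ excludes (a) tables with duplicate keys — a Python dict can never contain them, so the
-- assoc-list encoding of a dict input is duplicate-free by construction — and (b) inputs where
-- Python A raises IndexError: `table[i][1] += 1` (ham) needs row length ≥ 2 and
-- `table[i][0] += 1` (spam) needs row length ≥ 1, for rows of words that occur in mail.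
def Pre_sort_mail (mail : List String) (category : String) (table : List (String × List Int)) : Prop :=
  (table.map Prod.fst).Nodup ∧
  (category = "ham" → ∀ kv ∈ table, kv.1 ∈ mail → 2 ≤ kv.2.length) ∧
  (category = "spam" → ∀ kv ∈ table, kv.1 ∈ mail → 1 ≤ kv.2.length)
instance (mail : List String) (category : String) (table : List (String × List Int)) : Decidable (Pre_sort_mail mail category table) := by unfold Pre_sort_mail; infer_instance

def pvWitness_sort_mail : List String × String × (List (String × List Int)) :=
  (["a", "b", "a"], "ham", [("b", [0, 5, 0, 0])])

def Spec_sort_mail (mail : List String) (category : String) (table : List (String × List Int)) (out : List (String × List Int)) : Prop := out = sort_mail_alt mail category table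
instance (mail : List String) (category : String) (table : List (String × List Int)) (out : List (String × List Int)) : Decidable (Spec_sort_mail mail category table out) := by unfold Spec_sort_mail; infer_instance

-- ===== CLAIM (what is proved, stated in full; the proofs are below) =====
def Claim_equal_sort_mail : Prop := ∀ (mail : List String) (category : String) (table : List (String × List Int)), Dom_sort_mail mail category table → Pre_sort_mail mail category table → Spec_sort_mail mail category table (sort_mail mail category table)

-- ===== LEMMAS AND PROOFS =====

-- row.set idx (row[idx] + c); total: out-of-range set is a no-op (those inputs are outside Pre_)
def pvBump (idx : Nat) (c : Int) (row : List Int) : List Int := row.set idx (row.getD idx 0 + c)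

-- one step of A's loop once the category is fixed (ham: idx = 1, spam: idx = 0)
def pvStepA (idx : Nat) (d : PySem.Dict String (List Int)) (w : String) : PySem.Dict String (List Int) :=
  if d.contains w then d.insert w (pvBump idx 1 (d.getD w [])) else d.insert w [1, 1, 0, 0]

-- one step of B's second loop
def pvStepB (idx : Nat) (d : PySem.Dict String (List Int)) (p : String × Int) : PySem.Dict String (List Int) :=
  if d.contains p.1 then d.insert p.1 (pvBump idx p.2 (d.getD p.1 [])) else d.insert p.1 ([1, 1, 0, 0].set idx p.2)

-- normal form reached by B's fold over a key-nodup (word, count) list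
def pvR (idx : Nat) (d : PySem.Dict String (List Int)) (ps : List (String × Int)) : List (String × List Int) :=
  d.items.map (fun kv => (kv.1, match ps.lookup kv.1 with | some c => pvBump idx c kv.2 | none => kv.2))
  ++ (ps.filter (fun p => !(d.contains p.1))).map (fun p => (p.1, [1, 1, 0, 0].set idx p.2))

-- normal form reached by A's fold over the raw mail
def pvRm (idx : Nat) (d : PySem.Dict String (List Int)) (mail : List String) : List (String × List Int) :=
  d.items.map (fun kv => (kv.1, pvBump idx (mail.count kv.1 : Int) kv.2))
  ++ ((PySem.Set.ofList mail).filter (fun w => !(d.contains w))).map (fun w => (w, [1, 1, 0, 0].set idx (mail.count w : Int)))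

theorem pvGetD_set_self (row : List Int) (idx : Nat) (x : Int) (h : idx < row.length) :
    (row.set idx x).getD idx 0 = x := by
  rw [List.getD_eq_getElem?_getD, List.getElem?_set_self h]; rfl

theorem pvBump_zero (idx : Nat) (row : List Int) : pvBump idx 0 row = row := by
  unfold pvBump
  by_cases h : idx < row.length
  · rw [add_zero, List.getD_eq_getElem?_getD, List.getElem?_eq_getElem h]
    exact List.set_getElem_self ..
  · exact List.set_eq_of_length_le (by omega)

theorem pvBump_pvBump (idx : Nat) (a b : Int) (row : List Int) :
    pvBump idx a (pvBump idx b row) = pvBump idx (b + a) row := by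
  unfold pvBump
  by_cases h : idx < row.length
  · rw [pvGetD_set_self _ _ _ h, List.set_set, add_assoc]
  · have hle : row.length ≤ idx := by omega
    rw [List.set_eq_of_length_le hle, List.set_eq_of_length_le hle, List.set_eq_of_length_le hle]

theorem pvLookup_map_pair (l : List String) (g : String → Int) (k : String) :
    (l.map (fun x => (x, g x))).lookup k = if k ∈ l then some (g k) else none := by
  induction l with
  | nil => simp
  | cons a l ih =>
    simp only [List.map_cons, List.lookup_cons]
    by_cases h : k = a
    · subst h; simp
    · have hb : (k == a) = false := by simp [h]
      simp [hb, ih, h]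

theorem pvLookup_eq_none (ps : List (String × Int)) (k : String) (h : k ∉ ps.map Prod.fst) :
    ps.lookup k = none := by
  induction ps with
  | nil => rfl
  | cons p ps ih =>
    simp only [List.map_cons, List.mem_cons, not_or] at h
    obtain ⟨a, b⟩ := p
    have hb : (k == a) = false := by simp [h.1]
    simp only [List.lookup, hb]
    exact ih h.2

theorem pvNotContains_ne (d : PySem.Dict String (List Int)) (w : String)
    (hc : d.contains w = false) : ∀ p ∈ d.items, p.1 ≠ w := by
  intro p hp he
  have : d.contains w = true := by
    rw [PySem.Dict.contains_iff_mem_keys]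
    exact he ▸ PySem.Dict.mem_keys_of_mem_items d hp
  simp [this] at hc

theorem pvDiscard_eq_filter (s : List String) (x : String) :
    PySem.Set.discard s x = s.filter (fun y => y != x) := rfl

theorem pvBump_init (idx : Nat) (hidx : idx ≤ 1) (c : Nat) :
    pvBump idx (c : Int) [1, 1, 0, 0] = [1, 1, 0, 0].set idx ((c + 1 : Nat) : Int) := by
  interval_cases idx <;> simp [pvBump, List.getD] <;> omega

theorem pvFoldA (idx : Nat) (hidx : idx ≤ 1) (mail : List String) :
    ∀ d : PySem.Dict String (List Int), d.keys.Nodup →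
      (mail.foldl (pvStepA idx) d).items = pvRm idx d mail := by
  induction mail with
  | nil =>
    intro d _
    simp [pvRm, pvBump_zero]
  | cons w ws ih =>
    intro d hn
    have hn' : (pvStepA idx d w).keys.Nodup := by
      unfold pvStepA; split <;> exact PySem.Dict.nodup_keys_insert _ _ _ hn
    rw [List.foldl_cons, ih _ hn']
    unfold pvRm pvStepA
    by_cases hc : d.contains w = true
    · rw [if_pos hc, PySem.Dict.items_insert_of_contains d _ hc, List.map_map]
      congr 1
      · apply List.map_congr_left
        intro p hp
        obtain ⟨pk, pv⟩ := p
        by_cases hpw : pk = w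
        · subst hpw
          have hget : d.getD pk [] = pv := PySem.Dict.getD_of_mem_items d hp hn []
          simp only [Function.comp_apply, beq_self_eq_true, if_true, hget]
          rw [pvBump_pvBump, List.count_cons, if_pos (by simp)]
          have harith : (1 + (List.count pk ws : Int)) = ((List.count pk ws + 1 : Nat) : Int) := by
            push_cast; ring
          rw [harith]
        · have hb : (pk == w) = false := by simp [hpw]
          simp only [Function.comp_apply, hb, Bool.false_eq_true, if_false]
          rw [List.count_cons, if_neg (by simp [Ne.symm hpw]), add_zero]
      · rw [PySem.Set.ofList_cons, pvDiscard_eq_filter, List.filter_cons]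
        rw [if_neg (by simp [hc]), List.filter_filter]
        have hpred : (fun u => !((d.insert w (pvBump idx 1 (d.getD w []))).contains u))
            = (fun u => !(d.contains u) && (u != w)) := by
          funext u
          rw [PySem.Dict.contains_insert]
          cases hu : u == w <;> cases hd : d.contains u <;> simp_all
        rw [hpred]
        apply List.map_congr_left
        intro u hu
        have hne : u ≠ w := by
          have := (List.mem_filter.mp hu).2
          simp at this
          exact this.2
        rw [List.count_cons, if_neg (by simp [Ne.symm hne]), add_zero]
    · have hc' : d.contains w = false := by simpa using hc
      rw [if_neg hc, PySem.Dict.items_insert_of_not_contains d _ hc', List.map_append]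
      rw [PySem.Set.ofList_cons, pvDiscard_eq_filter, List.filter_cons]
      rw [if_pos (by simp [hc']), List.map_cons, List.filter_filter]
      rw [List.append_assoc, List.map_cons, List.map_nil, List.singleton_append]
      congr 1
      · apply List.map_congr_left
        intro p hp
        have hne : p.1 ≠ w := pvNotContains_ne d w hc' p hp
        rw [List.count_cons, if_neg (by simp [Ne.symm hne]), add_zero]
      · congr 1
        · -- head pair
          rw [List.count_cons, if_pos (by simp)]
          congr 1
          exact pvBump_init idx hidx (ws.count w)
        · have hpred : (fun u => !((d.insert w [1, 1, 0, 0]).contains u))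
              = (fun u => !(d.contains u) && (u != w)) := by
            funext u
            rw [PySem.Dict.contains_insert]
            cases hu : u == w <;> cases hd : d.contains u <;> simp_all
          rw [hpred]
          apply List.map_congr_left
          intro u hu
          have hne : u ≠ w := by
            have := (List.mem_filter.mp hu).2
            simp at this
            exact this.2
          rw [List.count_cons, if_neg (by simp [Ne.symm hne]), add_zero]

theorem pvFoldB (idx : Nat) (ps : List (String × Int)) :
    ∀ d : PySem.Dict String (List Int), d.keys.Nodup → (ps.map Prod.fst).Nodup →
      (ps.foldl (pvStepB idx) d).items = pvR idx d ps := by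
  induction ps with
  | nil =>
    intro d _ _
    simp [pvR]
  | cons p ps ih =>
    intro d hn hps
    obtain ⟨w, c⟩ := p
    rw [List.map_cons, List.nodup_cons] at hps
    obtain ⟨hwps, hps'⟩ := hps
    have hn' : (pvStepB idx d (w, c)).keys.Nodup := by
      unfold pvStepB; split <;> exact PySem.Dict.nodup_keys_insert _ _ _ hn
    rw [List.foldl_cons, ih _ hn' hps']
    unfold pvR pvStepB
    by_cases hc : d.contains (w, c).1 = true
    · rw [if_pos hc, PySem.Dict.items_insert_of_contains d _ hc, List.map_map]
      congr 1
      · apply List.map_congr_left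
        intro q hq
        obtain ⟨qk, qv⟩ := q
        by_cases hqw : qk = w
        · subst hqw
          have hget : d.getD qk [] = qv := PySem.Dict.getD_of_mem_items d hq hn []
          simp only [Function.comp_apply, beq_self_eq_true, if_true, hget]
          rw [pvLookup_eq_none ps qk hwps]
          simp [List.lookup]
        · have hb : (qk == w) = false := by simp [hqw]
          simp only [Function.comp_apply, Bool.false_eq_true, if_false, List.lookup, hb]
      · rw [List.filter_cons, if_neg (by simp [hc])]
        refine congrArg _ ?_
        apply List.filter_congr
        intro q hq
        have hqw : q.1 ≠ w := by
          intro he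
          have hmem : q.1 ∈ ps.map Prod.fst := List.mem_map_of_mem hq
          rw [he] at hmem
          exact hwps hmem
        rw [PySem.Dict.contains_insert]
        simp [hqw]
    · have hc' : d.contains w = false := by simpa using hc
      rw [if_neg hc, PySem.Dict.items_insert_of_not_contains d _ hc', List.map_append]
      rw [List.filter_cons, if_pos (by simp [hc']), List.map_cons]
      rw [List.append_assoc, List.map_cons, List.map_nil, List.singleton_append]
      congr 1
      · apply List.map_congr_left
        intro q hq
        have hqw : (q.1 == w) = false := by simp [pvNotContains_ne d w hc' q hq]
        simp only [List.lookup, hqw]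
      · congr 1
        · rw [pvLookup_eq_none ps w hwps]
        · refine congrArg _ ?_
          apply List.filter_congr
          intro q hq
          have hqw : q.1 ≠ w := by
            intro he
            have hmem : q.1 ∈ ps.map Prod.fst := List.mem_map_of_mem hq
            rw [he] at hmem
            exact hwps hmem
          rw [PySem.Dict.contains_insert]
          simp [hqw]

theorem pvR_counts (idx : Nat) (d : PySem.Dict String (List Int)) (mail : List String) :
    pvR idx d ((PySem.Set.ofList mail).map (fun k => (k, (mail.count k : Int)))) = pvRm idx d mail := by
  unfold pvR pvRm
  congr 1
  · apply List.map_congr_left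
    intro kv _
    rw [pvLookup_map_pair]
    by_cases hm : kv.1 ∈ PySem.Set.ofList mail
    · rw [if_pos hm]
    · rw [if_neg hm]
      have h0 : mail.count kv.1 = 0 := by
        rw [List.count_eq_zero]
        rwa [PySem.Set.mem_ofList] at hm
      rw [h0]
      exact congrArg _ (pvBump_zero idx kv.2).symm
  · rw [List.filter_map, List.map_map]
    rfl

theorem pvFoldl_id (l : List String) (d : PySem.Dict String (List Int)) :
    l.foldl (fun d _ => d) d = d := by
  induction l with
  | nil => rfl
  | cons x l ih => rw [List.foldl_cons]; exact ih

theorem pvTally_eq (idx : Nat) (mail : List String) (table : List (String × List Int))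
    (hnd : (table.map Prod.fst).Nodup) :
    sortTally idx mail table = pvRm idx (PySem.Dict.mk table) mail := by
  have hkeys : (PySem.Dict.mk table).keys.Nodup := hnd
  show ((mail.foldl (fun d w => d.insert w (d.getD w 0 + 1)) PySem.Dict.empty).items.foldl
      (pvStepB idx) (PySem.Dict.mk table)).items = _
  rw [PySem.Dict.foldl_insert_getD_add_one_eq_counter, PySem.Dict.items_counter]
  have hpsnd : (((PySem.Set.ofList mail).map (fun k => (k, (mail.count k : Int)))).map Prod.fst).Nodup := by
    rw [List.map_map]
    have he : (Prod.fst ∘ fun k : String => (k, (mail.count k : Int))) = id := rfl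
    rw [he, List.map_id]
    exact PySem.Set.nodup_ofList mail
  rw [pvFoldB idx _ _ hkeys hpsnd, pvR_counts]

-- ===== VERDICT (by name: the statement is the Claim_ definition above) =====
theorem sort_mail_spec : Claim_equal_sort_mail := by
  intro mail category table _ hpre
  obtain ⟨hnd, -, -⟩ := hpre
  have hkeys : (PySem.Dict.mk table).keys.Nodup := hnd
  unfold Spec_sort_mail
  by_cases h1 : category = "ham"
  · subst h1
    show (mail.foldl (pvStepA 1) (PySem.Dict.mk table)).items = _
    rw [pvFoldA 1 (by norm_num) mail _ hkeys]
    unfold sort_mail_alt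
    rw [if_pos (by simp), pvTally_eq 1 mail table hnd]
  · by_cases h2 : category = "spam"
    · subst h2
      show (mail.foldl (pvStepA 0) (PySem.Dict.mk table)).items = _
      rw [pvFoldA 0 (by norm_num) mail _ hkeys]
      unfold sort_mail_alt
      rw [if_neg (by decide), if_pos (by simp), pvTally_eq 0 mail table hnd]
    · have e : (fun (d : PySem.Dict String (List Int)) (i : String) =>
          if category == "ham" then
            if d.contains i then d.insert i ((d.getD i []).set 1 ((d.getD i []).getD 1 0 + 1))
            else d.insert i [1, 1, 0, 0]
          else if category == "spam" then
            if d.contains i then d.insert i ((d.getD i []).set 0 ((d.getD i []).getD 0 0 + 1))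
            else d.insert i [1, 1, 0, 0]
          else d) = (fun d _ => d) := by
        funext d i
        rw [if_neg (by simp [h1]), if_neg (by simp [h2])]
      unfold sort_mail
      rw [e, pvFoldl_id]
      unfold sort_mail_alt
      rw [if_neg (by simp [h1]), if_neg (by simp [h2])]
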